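-- pv_equiv track=rewrite | github.com/miliar/Code_Jam_Webscraper | solutions_python/Problem_138/826.py | subopt
-- ===== SOURCE A (Python) =====
-- def subopt(P1, P2):
--     P1 = [k for k in P1]
--     P2 = [k for k in P2]
--     score = 0
--     for k in P1:
--         if k > max(P2):
--             score += 1
--             P2.pop(0)
--         else:
--             index = 0
--             while(P2[index] < k):
--                 index += 1
--             P2.pop(index)
--     return score
-- ===== SOURCE B (Python) =====
-- def subopt(P1, P2):
--     # Persistent tournament tree over P2 positions: each node stores the max of its
--     # alive leaves (None = all deleted). Global max, pop-front and delete-first->=k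
--     # each take O(log n), giving O((len(P1)+len(P2)) log len(P2)).
--
--     def mx(a, b):
--         if a is None:
--             return b
--         if b is None:
--             return a
--         return a if a >= b else b
--
--     def build(lo, hi):  # tree over P2[lo:hi], hi > lo; node = (max, left, right)
--         if hi - lo == 1:
--             return (P2[lo], None, None)
--         mid = (lo + hi) // 2
--         l = build(lo, mid)
--         r = build(mid, hi)
--         return (mx(l[0], r[0]), l, r)
--
--     def popfront(t):  # delete leftmost alive leaf (assumes one exists)
--         m, l, r = t
--         if l is None:  # leaf
--             return (None, None, None)
--         if l[0] is not None:
--             l2 = popfront(l)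
--             return (mx(l2[0], r[0]), l2, r)
--         r2 = popfront(r)
--         return (mx(l[0], r2[0]), l, r2)
--
--     def delge(t, k):  # delete leftmost alive leaf with value >= k (assumes one exists)
--         m, l, r = t
--         if l is None:  # leaf
--             return (None, None, None)
--         if l[0] is not None and l[0] >= k:
--             l2 = delge(l, k)
--             return (mx(l2[0], r[0]), l2, r)
--         r2 = delge(r, k)
--         return (mx(l[0], r2[0]), l, r2)
--
--     t = build(0, len(P2)) if P2 else None
--     score = 0
--     for k in P1:
--         m = t[0]
--         if k > m:
--             score += 1
--             t = popfront(t)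
--         else:
--             t = delge(t, k)
--     return score
-- ===== Notes on version B (the rewrite author's own statement) =====
-- stated objective: faster
-- what changed: Replaces A's per-round max(P2) scan and linear search-and-pop with a single persistent max-tournament tree over P2's positions, giving O(log n) global max, pop-front and delete-first-element->=k per round.
import Mathlib
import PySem

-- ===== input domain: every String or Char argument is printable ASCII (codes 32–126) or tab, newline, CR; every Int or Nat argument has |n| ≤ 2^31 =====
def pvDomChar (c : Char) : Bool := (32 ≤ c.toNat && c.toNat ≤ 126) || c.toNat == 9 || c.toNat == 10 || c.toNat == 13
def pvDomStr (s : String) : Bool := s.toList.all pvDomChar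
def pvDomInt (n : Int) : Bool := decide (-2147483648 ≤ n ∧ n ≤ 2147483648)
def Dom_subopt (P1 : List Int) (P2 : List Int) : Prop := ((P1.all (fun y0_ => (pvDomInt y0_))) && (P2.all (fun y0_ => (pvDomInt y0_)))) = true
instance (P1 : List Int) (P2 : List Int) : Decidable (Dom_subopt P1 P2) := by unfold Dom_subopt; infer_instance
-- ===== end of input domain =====

-- B replaces A's per-round max() scan and linear search by one persistent
-- max-tournament tree over P2's positions (O((|P1|+|P2|) log |P2|) vs O(|P1|·|P2|)).

-- ===== PORT A =====
-- 'while P2[index] < k: index += 1' — recursion on the index; pyGet? = P2[index]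
-- (none = IndexError).
def suboptWhile (L : List Int) (k : Int) (idx : Nat) : Option Nat :=
  match h : PySem.List.pyGet? L (idx : Int) with
  | none => none
  | some v => if v < k then suboptWhile L k (idx + 1) else some idx
termination_by L.length - idx
decreasing_by
  have : idx < L.length := by
    by_contra hc
    rw [PySem.List.pyGet?_natCast] at h
    simp [List.getElem?_eq_none (by omega : L.length ≤ idx)] at h
  omega

-- one iteration of A's 'for k in P1' loop; state = (score, current P2); none = raised
def suboptStep (st : Option (Int × List Int)) (k : Int) : Option (Int × List Int) :=
  match st with
  | none => none
  | some (score, L) =>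
    match PySem.List.max? L (fun y => y) with
    | none => none   -- max() of empty list: ValueError
    | some m =>
      if k > m then
        match PySem.List.pop? L 0 with
        | none => none
        | some (_, L') => some (score + 1, L')
      else
        match suboptWhile L k 0 with
        | none => none   -- IndexError
        | some idx =>
          match PySem.List.pop? L (idx : Int) with
          | none => none
          | some (_, L') => some (score, L')

-- A copies P1 and P2 first ('[k for k in P1]'); value-irrelevant here.
def subopt (P1 : List Int) (P2 : List Int) : Int :=
  match P1.foldl suboptStep (some (0, P2)) with
  | some (score, _) => score
  | none => 0

-- ===== PORT B =====
-- node = (max of alive leaves (none = all deleted), left, right), as in Source B's tuples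
inductive PvTree where
  | leaf : Option Int → PvTree
  | node : Option Int → PvTree → PvTree → PvTree
deriving Repr

def PvTree.mx : PvTree → Option Int
  | .leaf v => v
  | .node m _ _ => m

-- Source B's mx: None-aware max of two node values
def pvMx (a b : Option Int) : Option Int :=
  match a, b with
  | none, b => b
  | a, none => a
  | some a, some b => some (if a ≥ b then a else b)

-- Source B's build: split the segment in half; empty P2 gives Python's t = None,
-- modelled as a leaf with value none (its mx is none either way).
def pvBuild (xs : List Int) : PvTree :=
  match xs with
  | [] => .leaf none
  | [x] => .leaf (some x)
  | x :: y :: rest =>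
    let l := pvBuild ((x :: y :: rest).take ((x :: y :: rest).length / 2))
    let r := pvBuild ((x :: y :: rest).drop ((x :: y :: rest).length / 2))
    .node (pvMx l.mx r.mx) l r
termination_by xs.length
decreasing_by
  all_goals (simp [List.length_take, List.length_drop]; omega)

-- Source B's popfront: delete the leftmost alive leaf
def pvPopFront : PvTree → PvTree
  | .leaf _ => .leaf none
  | .node _ l r =>
    match l.mx with
    | some _ => let l2 := pvPopFront l; .node (pvMx l2.mx r.mx) l2 r
    | none => let r2 := pvPopFront r; .node (pvMx l.mx r2.mx) l r2

-- Source B's delge: delete the leftmost alive leaf with value >= k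
def pvDelGe (k : Int) : PvTree → PvTree
  | .leaf _ => .leaf none
  | .node _ l r =>
    match l.mx with
    | some m =>
      if k ≤ m then let l2 := pvDelGe k l; .node (pvMx l2.mx r.mx) l2 r
      else let r2 := pvDelGe k r; .node (pvMx l.mx r2.mx) l r2
    | none => let r2 := pvDelGe k r; .node (pvMx l.mx r2.mx) l r2

-- one iteration of Source B's loop; none = raised (t is None / comparison with None)
def suboptAltStep (st : Option (Int × PvTree)) (k : Int) : Option (Int × PvTree) :=
  match st with
  | none => none
  | some (score, t) =>
    match t.mx with
    | none => none
    | some m =>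
      if k > m then some (score + 1, pvPopFront t)
      else some (score, pvDelGe k t)

def subopt_alt (P1 : List Int) (P2 : List Int) : Int :=
  match P1.foldl suboptAltStep (some (0, pvBuild P2)) with
  | some (score, _) => score
  | none => 0

-- ===== PRECONDITION & SPEC =====
-- Exactly where A returns: each of the len(P1) rounds removes one element of P2,
-- so A raises (max()/indexing on an exhausted P2) iff len(P2) < len(P1).
def Pre_subopt (P1 : List Int) (P2 : List Int) : Prop := P1.length ≤ P2.length
instance (P1 : List Int) (P2 : List Int) : Decidable (Pre_subopt P1 P2) := by unfold Pre_subopt; infer_instance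
def pvWitness_subopt : List Int × List Int := ([2, 1], [1, 3])
def Spec_subopt (P1 : List Int) (P2 : List Int) (out : Int) : Prop := out = subopt_alt P1 P2
instance (P1 : List Int) (P2 : List Int) (out : Int) : Decidable (Spec_subopt P1 P2 out) := by unfold Spec_subopt; infer_instance

-- ===== CLAIM (what is proved, stated in full; the proofs are below) =====
def Claim_equal_subopt : Prop := ∀ (P1 : List Int) (P2 : List Int), Dom_subopt P1 P2 → Pre_subopt P1 P2 → Spec_subopt P1 P2 (subopt P1 P2)

-- ===== LEMMAS AND PROOFS =====

-- alive values of the tree, in position order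
def PvTree.alive : PvTree → List Int
  | .leaf none => []
  | .leaf (some v) => [v]
  | .node _ l r => l.alive ++ r.alive

-- structural well-formedness: every node caches pvMx of its children
def PvInv : PvTree → Prop
  | .leaf _ => True
  | .node m l r => m = pvMx l.mx r.mx ∧ PvInv l ∧ PvInv r

-- the list max A computes each round
def mxO (L : List Int) : Option Int := PySem.List.max? L (fun y => y)

-- first element ≥ k removed (abstract form of both removals in the losing branch)
def rmGe (k : Int) : List Int → List Int
  | [] => []
  | x :: xs => if k ≤ x then xs else x :: rmGe k xs

theorem pvMx_none_left (b : Option Int) : pvMx none b = b := rfl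

theorem pvMx_some_none (a : Int) : pvMx (some a) none = some a := rfl

theorem max?_id_nil : PySem.List.max? ([] : List Int) (fun y => y) = none :=
  (PySem.List.max?_eq_none_iff _ _).mpr rfl

theorem mxO_nil : mxO [] = none := by
  rw [mxO]; exact (PySem.List.max?_eq_none_iff _ _).mpr rfl

theorem mxO_singleton (v : Int) : mxO [v] = some v := by
  simp [mxO, PySem.List.max?_id_cons]

theorem pvMx_some_some (a b : Int) : pvMx (some a) (some b) = some (max a b) := by
  simp only [pvMx]
  congr 1
  omega

theorem foldl_max_comm (l : List Int) : ∀ a b : Int, l.foldl max (max a b) = max a (l.foldl max b) := by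
  induction l with
  | nil => intro a b; rfl
  | cons c l ih =>
    intro a b
    simp only [List.foldl_cons]
    rw [max_assoc, ih]

theorem mxO_append (a b : List Int) : mxO (a ++ b) = pvMx (mxO a) (mxO b) := by
  cases a with
  | nil => simp [mxO_nil, pvMx_none_left]
  | cons x a' =>
    cases b with
    | nil => simp [List.append_nil, mxO, PySem.List.max?_id_cons, max?_id_nil, pvMx_some_none]
    | cons y b' =>
      simp only [mxO, List.cons_append, PySem.List.max?_id_cons, pvMx_some_some]
      rw [List.foldl_append]
      simp only [List.foldl_cons]
      rw [foldl_max_comm]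

theorem mxO_eq_none_iff (L : List Int) : mxO L = none ↔ L = [] := by
  simp [mxO, PySem.List.max?_eq_none_iff]

theorem pvInv_mx (t : PvTree) (h : PvInv t) : t.mx = mxO t.alive := by
  induction t with
  | leaf v => cases v <;> simp [PvTree.mx, PvTree.alive, mxO_nil, mxO_singleton]
  | node m l r ihl ihr =>
    obtain ⟨hm, hl, hr⟩ := h
    simp only [PvTree.mx, PvTree.alive]
    rw [mxO_append, hm, ihl hl, ihr hr]

theorem pvBuild_spec (xs : List Int) : PvInv (pvBuild xs) ∧ (pvBuild xs).alive = xs := by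
  induction xs using pvBuild.induct with
  | case1 => simp [pvBuild, PvInv, PvTree.alive]
  | case2 x => simp [pvBuild, PvInv, PvTree.alive]
  | case3 x y rest ih1 ih2 =>
    rw [pvBuild]
    refine ⟨⟨rfl, ih1.1, ih2.1⟩, ?_⟩
    simp only [PvTree.alive]
    rw [ih1.2, ih2.2, List.take_append_drop]

theorem pvPopFront_spec (t : PvTree) (h : PvInv t) :
    ∀ v rest, t.alive = v :: rest → PvInv (pvPopFront t) ∧ (pvPopFront t).alive = rest := by
  induction t with
  | leaf w =>
    intro v rest hav
    cases w with
    | none => simp [PvTree.alive] at hav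
    | some w =>
      simp only [PvTree.alive] at hav
      injection hav with h1 h2
      exact ⟨trivial, by simp [pvPopFront, PvTree.alive]; exact h2.symm⟩
  | node m l r ihl ihr =>
    intro v rest hav
    obtain ⟨hm, hl, hr⟩ := h
    have hlmx := pvInv_mx l hl
    simp only [PvTree.alive] at hav
    cases hml : l.mx with
    | none =>
      have hle : l.alive = [] := by rw [hlmx] at hml; exact (mxO_eq_none_iff _).mp hml
      rw [hle, List.nil_append] at hav
      obtain ⟨h1, h2⟩ := ihr hr v rest hav
      simp only [pvPopFront, hml]
      exact ⟨⟨by rw [hml], hl, h1⟩, by simp [PvTree.alive, hle, h2]⟩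
    | some w =>
      have hne : l.alive ≠ [] := by
        intro he
        rw [hlmx, (mxO_eq_none_iff _).mpr he] at hml
        simp at hml
      obtain ⟨a, as, hae⟩ := List.exists_cons_of_ne_nil hne
      rw [hae, List.cons_append] at hav
      have hva : v = a := (((List.cons.injEq ..).mp hav).1).symm
      have hrest : rest = as ++ r.alive := (((List.cons.injEq ..).mp hav).2).symm
      obtain ⟨h1, h2⟩ := ihl hl a as hae
      simp only [pvPopFront, hml]
      exact ⟨⟨rfl, h1, hr⟩, by simp [PvTree.alive, h2, hrest]⟩

theorem rmGe_append_left (k : Int) (a b : List Int) (h : ∃ v ∈ a, k ≤ v) :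
    rmGe k (a ++ b) = rmGe k a ++ b := by
  induction a with
  | nil => simp at h
  | cons x a' ih =>
    by_cases hx : k ≤ x
    · simp [rmGe, hx]
    · have h' : ∃ v ∈ a', k ≤ v := by
        obtain ⟨v, hv, hkv⟩ := h
        rcases List.mem_cons.mp hv with rfl | hv'
        · exact absurd hkv hx
        · exact ⟨v, hv', hkv⟩
      simp [rmGe, hx, ih h']

theorem rmGe_append_right (k : Int) (a b : List Int) (h : ∀ x ∈ a, x < k) :
    rmGe k (a ++ b) = a ++ rmGe k b := by
  induction a with
  | nil => simp
  | cons x a' ih =>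
    have hx : ¬ k ≤ x := by have := h x (List.mem_cons_self ..); omega
    simp only [List.cons_append, rmGe, if_neg hx]
    rw [ih (fun y hy => h y (List.mem_cons_of_mem _ hy))]

theorem pvDelGe_spec (k : Int) (t : PvTree) (h : PvInv t) (hex : ∃ v ∈ t.alive, k ≤ v) :
    PvInv (pvDelGe k t) ∧ (pvDelGe k t).alive = rmGe k t.alive := by
  induction t with
  | leaf w =>
    cases w with
    | none => simp [PvTree.alive] at hex
    | some w =>
      simp only [PvTree.alive, List.mem_singleton] at hex
      obtain ⟨v, rfl, hkv⟩ := hex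
      refine ⟨trivial, ?_⟩
      simp [pvDelGe, PvTree.alive, rmGe, hkv]
  | node m l r ihl ihr =>
    obtain ⟨hm, hl, hr⟩ := h
    have hlmx := pvInv_mx l hl
    simp only [PvTree.alive] at hex
    cases hml : l.mx with
    | none =>
      have hle : l.alive = [] := by rw [hlmx] at hml; exact (mxO_eq_none_iff _).mp hml
      have hex' : ∃ v ∈ r.alive, k ≤ v := by
        obtain ⟨v, hv, hkv⟩ := hex
        rcases List.mem_append.mp hv with hv' | hv'
        · rw [hle] at hv'; simp at hv'
        · exact ⟨v, hv', hkv⟩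
      obtain ⟨h1, h2⟩ := ihr hr hex'
      simp only [pvDelGe, hml]
      refine ⟨⟨by rw [hml], hl, h1⟩, ?_⟩
      simp [PvTree.alive, h2, hle]
    | some m0 =>
      by_cases hk : k ≤ m0
      · have hm0 : m0 ∈ l.alive := by
          have hsome : PySem.List.max? l.alive (fun y => y) = some m0 := by
            rw [← mxO, ← hlmx]; exact hml
          exact PySem.List.max?_mem hsome
        obtain ⟨h1, h2⟩ := ihl hl ⟨m0, hm0, hk⟩
        simp only [pvDelGe, hml, if_pos hk]
        refine ⟨⟨rfl, h1, hr⟩, ?_⟩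
        simp only [PvTree.alive, h2]
        rw [rmGe_append_left k _ _ ⟨m0, hm0, hk⟩]
      · have hall : ∀ x ∈ l.alive, x < k := by
          intro x hx
          have hsome : PySem.List.max? l.alive (fun y => y) = some m0 := by
            rw [← mxO, ← hlmx]; exact hml
          have := PySem.List.max?_isMax hsome x hx
          simp only at this
          omega
        have hex' : ∃ v ∈ r.alive, k ≤ v := by
          obtain ⟨v, hv, hkv⟩ := hex
          rcases List.mem_append.mp hv with hv' | hv'
          · exact absurd hkv (by have := hall v hv'; omega)
          · exact ⟨v, hv', hkv⟩
        obtain ⟨h1, h2⟩ := ihr hr hex'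
        simp only [pvDelGe, hml, if_neg hk]
        refine ⟨⟨by rw [hml], hl, h1⟩, ?_⟩
        simp only [PvTree.alive, h2]
        rw [rmGe_append_right k _ _ hall]

theorem suboptWhile_eq (L : List Int) (k : Int) (idx : Nat) :
    suboptWhile L k idx = (match PySem.List.pyGet? L (idx : Int) with
      | none => none
      | some v => if v < k then suboptWhile L k (idx + 1) else some idx) := by
  rw [suboptWhile]
  split <;> rename_i heq <;> simp [heq]

theorem pyGet?_cons_natSucc (x : Int) (L : List Int) (idx : Nat) :
    PySem.List.pyGet? (x :: L) ((idx + 1 : Nat) : Int) = PySem.List.pyGet? L (idx : Int) := by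
  push_cast
  rw [PySem.List.pyGet?_cons_succ]

theorem suboptWhile_shift (x k : Int) (L : List Int) (idx : Nat) :
    suboptWhile (x :: L) k (idx + 1) = (suboptWhile L k idx).map (· + 1) := by
  induction idx using suboptWhile.induct (L := L) (k := k) with
  | case1 idx h =>
    rw [suboptWhile_eq (x :: L) k (idx + 1), pyGet?_cons_natSucc, h,
        suboptWhile_eq L k idx, h]
    rfl
  | case2 idx v h hv ih =>
    rw [suboptWhile_eq (x :: L) k (idx + 1), pyGet?_cons_natSucc, h,
        suboptWhile_eq L k idx, h]
    simp only [if_pos hv]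
    exact ih
  | case3 idx v h hv =>
    rw [suboptWhile_eq (x :: L) k (idx + 1), pyGet?_cons_natSucc, h,
        suboptWhile_eq L k idx, h]
    simp [hv]

theorem losing (k : Int) : ∀ L : List Int, (∃ v ∈ L, k ≤ v) →
    ∃ idx, suboptWhile L k 0 = some idx ∧ idx < L.length ∧ L.eraseIdx idx = rmGe k L := by
  intro L
  induction L with
  | nil => intro h; simp at h
  | cons y L' ih =>
    intro h
    have h0 : PySem.List.pyGet? (y :: L') ((0 : Nat) : Int) = some y := by
      simp
    by_cases hy : k ≤ y
    · refine ⟨0, ?_, by simp, by simp [rmGe, hy]⟩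
      rw [suboptWhile_eq, h0]
      simp [show ¬ y < k by omega]
    · have h' : ∃ v ∈ L', k ≤ v := by
        obtain ⟨v, hv, hkv⟩ := h
        rcases List.mem_cons.mp hv with rfl | hv'
        · exact absurd hkv hy
        · exact ⟨v, hv', hkv⟩
      obtain ⟨idx, hw, hlt, her⟩ := ih h'
      refine ⟨idx + 1, ?_, by simp; omega, ?_⟩
      · rw [suboptWhile_eq, h0]
        simp only [if_pos (by omega : y < k)]
        rw [suboptWhile_shift y k L' 0, hw]
        rfl
      · simp [List.eraseIdx_cons_succ, her, rmGe, hy]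

-- main correspondence: A's fold over (score, list) and B's fold over (score, tree)
theorem main_corr (P1 : List Int) : ∀ (s : Int) (L : List Int) (t : PvTree),
    PvInv t → t.alive = L → P1.length ≤ L.length →
    (P1.foldl suboptStep (some (s, L))).map Prod.fst =
    (P1.foldl suboptAltStep (some (s, t))).map Prod.fst := by
  induction P1 with
  | nil => intro s L t _ _ _; rfl
  | cons k P1' ih =>
    intro s L t hinv halive hlen
    obtain ⟨h0, L0, rfl⟩ : ∃ h0 L0, L = h0 :: L0 := by
      cases L with
      | nil => simp at hlen
      | cons a b => exact ⟨a, b, rfl⟩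
    have hmx : mxO (h0 :: L0) = some (L0.foldl max h0) := by
      simp [mxO, PySem.List.max?_id_cons]
    have htmx : t.mx = some (L0.foldl max h0) := by
      rw [pvInv_mx t hinv, halive, hmx]
    simp only [List.foldl_cons]
    by_cases hk : k > L0.foldl max h0
    · -- winning round: A pops P2[0], B deletes the leftmost alive leaf
      have hstepA : suboptStep (some (s, h0 :: L0)) k = some (s + 1, L0) := by
        simp [suboptStep, mxO] at hmx ⊢
        simp [hmx, if_pos hk]
      have hstepB : suboptAltStep (some (s, t)) k = some (s + 1, pvPopFront t) := by
        simp [suboptAltStep, htmx, if_pos hk]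
      obtain ⟨hinv', halive'⟩ := pvPopFront_spec t hinv h0 L0 halive
      rw [hstepA, hstepB]
      exact ih (s + 1) L0 _ hinv' halive' (by simp at hlen ⊢; omega)
    · -- losing round: both remove the first element ≥ k
      have hmax_mem : L0.foldl max h0 ∈ h0 :: L0 :=
      PySem.List.max?_mem (key := fun y => y) (by simp [PySem.List.max?_id_cons])
      have hex : ∃ v ∈ h0 :: L0, k ≤ v := ⟨L0.foldl max h0, hmax_mem, by omega⟩
      obtain ⟨idx, hw, hlt, her⟩ := losing k (h0 :: L0) hex
      have hpop : PySem.List.pop? (h0 :: L0) (idx : Int) =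
          some ((h0 :: L0)[idx]'hlt, rmGe k (h0 :: L0)) := by
        rw [PySem.List.pop?_natCast _ _ hlt, her]
      have hstepA : suboptStep (some (s, h0 :: L0)) k = some (s, rmGe k (h0 :: L0)) := by
        simp [suboptStep, mxO] at hmx ⊢
        simp [hmx, if_neg hk, hw, hpop]
      have hstepB : suboptAltStep (some (s, t)) k = some (s, pvDelGe k t) := by
        simp [suboptAltStep, htmx, if_neg hk]
      obtain ⟨hinv', halive'⟩ := pvDelGe_spec k t hinv (halive ▸ hex)
      rw [hstepA, hstepB]
      have hlen' : (rmGe k (h0 :: L0)).length = L0.length := by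
        rw [← her, List.length_eraseIdx_of_lt hlt]
        simp
      have hlen2 : P1'.length ≤ (rmGe k (h0 :: L0)).length := by
        rw [hlen']; simp at hlen; omega
      exact ih s (rmGe k (h0 :: L0)) _ hinv' (halive ▸ halive') hlen2

-- ===== VERDICT (by name: the statement is the Claim_ definition above) =====
theorem subopt_spec : Claim_equal_subopt := by
  intro P1 P2 _ hpre
  show subopt P1 P2 = subopt_alt P1 P2
  obtain ⟨hinv, halive⟩ := pvBuild_spec P2
  have h := main_corr P1 0 P2 (pvBuild P2) hinv halive hpre
  unfold subopt subopt_alt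
  cases hA : P1.foldl suboptStep (some (0, P2)) with
  | none =>
    rw [hA] at h
    cases hB : P1.foldl suboptAltStep (some (0, pvBuild P2)) with
    | none => rfl
    | some p => rw [hB] at h; simp at h
  | some p =>
    rw [hA] at h
    cases hB : P1.foldl suboptAltStep (some (0, pvBuild P2)) with
    | none => rw [hB] at h; simp at h
    | some q =>
      rw [hB] at h
      simp at h
      simp [h]
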